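-- pv_equiv track=rewrite | github.com/KANGladiator/Codessem5 | daa/Lab6-chorpolice/chorpolice.py | catchThieves
-- ===== SOURCE A (Python) =====
-- def catchThieves(grid, k):
--     m, n = len(grid), len(grid[0])
--     policemen = []
--     thieves = []
--
--
--     for i in range(m):
--         for j in range(n):
--             if grid[i][j] == 'P':
--                 policemen.append((i, j))
--             elif grid[i][j] == 'T':
--                 thieves.append((i, j))
--
--     caught_thieves = 0
--
--     for policeman in policemen:
--         x1, y1 = policeman
--         for thief in thieves[:]:
--             x2, y2 = thief
--             distance = abs(x1 - x2) + abs(y1 - y2)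
--
--             if distance <= k:
--                 caught_thieves += 1
--                 thieves.remove(thief)
--
--     return caught_thieves
-- ===== SOURCE B (Python) =====
-- def catchThieves(grid, k):
--     m, n = len(grid), len(grid[0])
--     police = [(i, j) for i in range(m) for j in range(n) if grid[i][j] == 'P']
--     return sum(
--         1
--         for i in range(m)
--         for j in range(n)
--         if grid[i][j] == 'T' and any(abs(i - x) + abs(j - y) <= k for x, y in police)
--     )
-- ===== Notes on version B (the rewrite author's own statement) =====
-- stated objective: simpler
-- what changed: A sweeps policeman-by-policeman over a mutable thieves list, counting and removing each caught thief; B does a single thief-centric pass counting the 'T' cells that have some policeman within Manhattan distance k, with no mutation and no removal bookkeeping.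
import Mathlib
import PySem

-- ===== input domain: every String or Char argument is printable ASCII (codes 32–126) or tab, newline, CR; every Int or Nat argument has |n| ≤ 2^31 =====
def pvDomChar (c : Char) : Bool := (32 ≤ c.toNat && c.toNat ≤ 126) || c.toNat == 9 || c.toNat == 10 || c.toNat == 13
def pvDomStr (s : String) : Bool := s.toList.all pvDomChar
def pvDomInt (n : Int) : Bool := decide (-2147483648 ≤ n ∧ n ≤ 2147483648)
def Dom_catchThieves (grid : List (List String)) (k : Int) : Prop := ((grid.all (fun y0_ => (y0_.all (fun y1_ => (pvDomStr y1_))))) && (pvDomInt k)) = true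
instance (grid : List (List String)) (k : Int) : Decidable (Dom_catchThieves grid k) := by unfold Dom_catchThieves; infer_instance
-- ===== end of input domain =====

-- B replaces A's destructive policeman-by-policeman sweep (counting and removing caught
-- thieves from a mutable list) by a single thief-centric pass: count the 'T' cells that have
-- some policeman within Manhattan distance k.  Objective: simpler (no mutation, one pass).

-- shared cell accessor: grid[i][j]; both Pythons access cells the same way, in range under Pre_
def pvCell (grid : List (List String)) (i j : Nat) : String := (grid.getD i []).getD j ""

-- ===== PORT A =====
def catchThieves (grid : List (List String)) (k : Int) : Int :=
  let m := grid.length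
  let n := (grid.headD []).length        -- len(grid[0]); Pre_ guarantees grid ≠ []
  -- first nested loop: collect policemen and thieves in scan order
  let scan :=
    (List.range m).foldl (fun (pt : List (Int × Int) × List (Int × Int)) i =>
      (List.range n).foldl (fun pt j =>
        if pvCell grid i j = "P" then (pt.1 ++ [((i : Int), (j : Int))], pt.2)
        else if pvCell grid i j = "T" then (pt.1, pt.2 ++ [((i : Int), (j : Int))])
        else pt) pt) ([], [])
  -- second loop: for each policeman, sweep a snapshot of the thieves list, removing the caught
  let res :=
    scan.1.foldl (fun (st : Int × List (Int × Int)) p =>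
      st.2.foldl (fun st' t =>
        if |p.1 - t.1| + |p.2 - t.2| ≤ k then
          (st'.1 + 1, (PySem.List.remove? st'.2 t).getD st'.2)   -- thieves.remove(thief); getD totalizes (t is always present)
        else st') st) (0, scan.2)
  res.1

-- ===== PORT B =====
def catchThieves_alt (grid : List (List String)) (k : Int) : Int :=
  let m := grid.length
  let n := (grid.headD []).length        -- len(grid[0]); Pre_ guarantees grid ≠ []
  let police :=
    (List.range m).flatMap (fun i =>
      (List.range n).filterMap (fun j =>
        if pvCell grid i j = "P" then some ((i : Int), (j : Int)) else none))
  ((List.range m).flatMap (fun i =>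
      (List.range n).filter (fun j =>
        decide (pvCell grid i j = "T") &&
        police.any (fun p => decide (|(i : Int) - p.1| + |(j : Int) - p.2| ≤ k))))).length

-- ===== PRECONDITION & SPEC =====
-- Pre_ = exactly the inputs where Python A returns: A evaluates grid[0] (IndexError on an
-- empty grid) and reads grid[i][j] for every j < len(grid[0]) (IndexError on a row shorter
-- than the first row).
def Pre_catchThieves (grid : List (List String)) (k : Int) : Prop :=
  grid ≠ [] ∧ ∀ row ∈ grid, (grid.headD []).length ≤ row.length
instance (grid : List (List String)) (k : Int) : Decidable (Pre_catchThieves grid k) := by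
  unfold Pre_catchThieves; infer_instance
def pvWitness_catchThieves : List (List String) × Int := ([["P", "."], [".", "T"]], 2)

def Spec_catchThieves (grid : List (List String)) (k : Int) (out : Int) : Prop := out = catchThieves_alt grid k
instance (grid : List (List String)) (k : Int) (out : Int) : Decidable (Spec_catchThieves grid k out) := by unfold Spec_catchThieves; infer_instance

-- ===== CLAIM (what is proved, stated in full; the proofs are below) =====
def Claim_equal_catchThieves : Prop := ∀ (grid : List (List String)) (k : Int), Dom_catchThieves grid k → Pre_catchThieves grid k → Spec_catchThieves grid k (catchThieves grid k)

-- ===== LEMMAS AND PROOFS =====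

-- abbreviations used only by the proofs
def pvPOf (grid : List (List String)) (i j : Nat) : Option (Int × Int) :=
  if pvCell grid i j = "P" then some ((i : Int), (j : Int)) else none
def pvTRow (grid : List (List String)) (n i : Nat) : List (Int × Int) :=
  ((List.range n).filter (fun j => decide (pvCell grid i j = "T"))).map (fun j : Nat => ((i : Int), (j : Int)))
def pvCatch (k : Int) (p t : Int × Int) : Bool := decide (|p.1 - t.1| + |p.2 - t.2| ≤ k)
def pvCaughtBy (k : Int) (ps : List (Int × Int)) (t : Int × Int) : Bool :=
  ps.any (fun p => pvCatch k p t)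

-- (1) the scan characterization
theorem scan_inner (grid : List (List String)) (i : Nat) :
    ∀ (l : List Nat) (pt : List (Int × Int) × List (Int × Int)),
      l.foldl (fun pt j =>
        if pvCell grid i j = "P" then (pt.1 ++ [((i : Int), (j : Int))], pt.2)
        else if pvCell grid i j = "T" then (pt.1, pt.2 ++ [((i : Int), (j : Int))])
        else pt) pt
      = (pt.1 ++ l.filterMap (pvPOf grid i),
         pt.2 ++ (l.filter (fun j => decide (pvCell grid i j = "T"))).map (fun j : Nat => ((i : Int), (j : Int)))) := by
  intro l
  induction l with
  | nil => intro pt; simp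
  | cons j l ih =>
    intro pt
    by_cases hP : pvCell grid i j = "P"
    · have hT : ¬ pvCell grid i j = "T" := by rw [hP]; decide
      simp [List.foldl_cons, hP, ih, pvPOf]
    · by_cases hT : pvCell grid i j = "T"
      · simp [List.foldl_cons, hT, ih, pvPOf]
      · simp [List.foldl_cons, hP, hT, ih, pvPOf]

theorem scan_eq (grid : List (List String)) (n : Nat) :
    ∀ (L : List Nat) (pt : List (Int × Int) × List (Int × Int)),
      L.foldl (fun pt i =>
        (List.range n).foldl (fun pt j =>
          if pvCell grid i j = "P" then (pt.1 ++ [((i : Int), (j : Int))], pt.2)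
          else if pvCell grid i j = "T" then (pt.1, pt.2 ++ [((i : Int), (j : Int))])
          else pt) pt) pt
      = (pt.1 ++ L.flatMap (fun i => (List.range n).filterMap (pvPOf grid i)),
         pt.2 ++ L.flatMap (pvTRow grid n)) := by
  intro L
  induction L with
  | nil => intro pt; simp
  | cons i L ih =>
    intro pt
    rw [List.foldl_cons, scan_inner, ih]
    simp [pvTRow]

-- (2) the thieves list has no duplicate positions
theorem tRows_nodup (grid : List (List String)) (n m : Nat) :
    ((List.range m).flatMap (pvTRow grid n)).Nodup := by
  rw [List.nodup_flatMap]
  constructor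
  · intro i _
    unfold pvTRow
    refine List.Nodup.map ?_ (List.nodup_range.filter _)
    intro a b h
    simpa using congrArg Prod.snd h
  · have hpw : List.Pairwise (· ≠ ·) (List.range m) :=
      List.pairwise_lt_range.imp (fun h => Nat.ne_of_lt h)
    refine hpw.imp ?_
    intro i j hne
    simp only [Function.onFun, List.Disjoint]
    intro t hti htj
    simp only [pvTRow, List.mem_map] at hti htj
    obtain ⟨a, -, ha⟩ := hti
    obtain ⟨b, -, hb⟩ := htj
    apply hne
    have h1 : ((i : Int)) = t.1 := congrArg Prod.fst ha
    have h2 : ((j : Int)) = t.1 := congrArg Prod.fst hb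
    exact_mod_cast h1.trans h2.symm

-- (3) remove? strikes the head occurrence past a prefix not containing it
theorem remove_append (t : Int × Int) (pre rest : List (Int × Int)) (hpre : t ∉ pre) :
      (PySem.List.remove? (pre ++ t :: rest) t).getD (pre ++ t :: rest) = pre ++ rest := by
  have hmem : t ∈ pre ++ t :: rest := by simp
  rw [PySem.List.remove?_eq_some_erase _ t hmem, Option.getD_some,
      List.erase_append_right _ hpre, List.erase_cons_head]

-- (4) the inner catching sweep
theorem inner_catch (k : Int) (p : Int × Int) :
    ∀ (l pre : List (Int × Int)) (c : Int), (pre ++ l).Nodup →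
      l.foldl (fun st' t =>
        if |p.1 - t.1| + |p.2 - t.2| ≤ k then
          (st'.1 + 1, (PySem.List.remove? st'.2 t).getD st'.2)
        else st') (c, pre ++ l)
      = (c + ((l.filter (pvCatch k p)).length : Int), pre ++ l.filter (fun t => ! pvCatch k p t)) := by
  intro l
  induction l with
  | nil => intro pre c _; simp
  | cons t l ih =>
    intro pre c hnd
    have htpre : t ∉ pre := fun h =>
      (List.disjoint_of_nodup_append hnd) h List.mem_cons_self
    by_cases hc : |p.1 - t.1| + |p.2 - t.2| ≤ k
    · have : (pre ++ l).Nodup := by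
        have := hnd.sublist (List.Sublist.append_left (List.sublist_cons_self t l) pre)
        exact this
      rw [List.foldl_cons]
      simp only [hc, if_pos]
      rw [remove_append t pre l htpre]
      rw [ih pre (c + 1) this]
      simp only [List.filter_cons, pvCatch, hc, decide_true, Bool.not_true, if_true,
        List.length_cons, Prod.mk.injEq]
      refine ⟨by push_cast; ring, rfl⟩
    · rw [List.foldl_cons]
      simp only [hc, if_neg, not_false_iff]
      have h2 : ((pre ++ [t]) ++ l).Nodup := by simpa using hnd
      have := ih (pre ++ [t]) c h2
      simp only [List.append_assoc, List.singleton_append] at this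
      rw [this]
      simp [pvCatch, hc]

-- (5) counting a disjunction
theorem count_or {α : Type} (a b : α → Bool) :
    ∀ l : List α,
      ((l.filter (fun t => a t || b t)).length)
        = (l.filter a).length + ((l.filter (fun t => ! a t)).filter b).length := by
  intro l
  induction l with
  | nil => simp
  | cons x l ih =>
    by_cases ha : a x
    · simp [ha, ih]; omega
    · by_cases hb : b x <;> simp [ha, hb, ih] <;> omega

-- (6) the outer catching loop
theorem outer_catch (k : Int) :
    ∀ (ps : List (Int × Int)) (ts : List (Int × Int)) (c : Int), ts.Nodup →
      ps.foldl (fun (st : Int × List (Int × Int)) p =>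
        st.2.foldl (fun st' t =>
          if |p.1 - t.1| + |p.2 - t.2| ≤ k then
            (st'.1 + 1, (PySem.List.remove? st'.2 t).getD st'.2)
          else st') st) (c, ts)
      = (c + ((ts.filter (pvCaughtBy k ps)).length : Int),
         ts.filter (fun t => ! pvCaughtBy k ps t)) := by
  intro ps
  induction ps with
  | nil => intro ts c _; simp [pvCaughtBy]
  | cons p ps ih =>
    intro ts c hnd
    rw [List.foldl_cons]
    have h1 := inner_catch k p ts [] c (by simpa using hnd)
    simp only [List.nil_append] at h1
    rw [h1, ih _ _ ((hnd.filter _))]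
    simp only [Prod.mk.injEq]
    have hcb : pvCaughtBy k (p :: ps) = fun t => (pvCatch k p t || pvCaughtBy k ps t) :=
      funext fun t => by simp [pvCaughtBy]
    constructor
    · simp only [hcb]
      rw [count_or (pvCatch k p) (pvCaughtBy k ps) ts]
      push_cast
      ring
    · simp only [hcb]
      rw [List.filter_filter]
      apply List.filter_congr
      intro t _
      cases pvCatch k p t <;> cases pvCaughtBy k ps t <;> rfl

-- (7) per-row equality of the two counts
theorem row_len (grid : List (List String)) (k : Int) (n : Nat) (police : List (Int × Int)) (i : Nat) :
    ((pvTRow grid n i).filter (pvCaughtBy k police)).length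
      = ((List.range n).filter (fun j =>
          decide (pvCell grid i j = "T") &&
          police.any (fun p => decide (|(i : Int) - p.1| + |(j : Int) - p.2| ≤ k)))).length := by
  unfold pvTRow
  rw [List.filter_map, List.length_map, List.filter_filter]
  congr 1
  apply List.filter_congr
  intro j _
  have hany : pvCaughtBy k police ((i : Int), (j : Int))
      = police.any (fun p => decide (|(i : Int) - p.1| + |(j : Int) - p.2| ≤ k)) := by
    unfold pvCaughtBy pvCatch
    refine List.any_congr rfl ?_
    intro p
    rw [abs_sub_comm p.1, abs_sub_comm p.2]
  simp only [Function.comp]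
  rw [hany, Bool.and_comm]

-- ===== VERDICT (by name: the statement is the Claim_ definition above) =====
theorem catchThieves_spec : Claim_equal_catchThieves := by
  intro grid k _ _
  show catchThieves grid k = catchThieves_alt grid k
  unfold catchThieves catchThieves_alt
  simp only []
  rw [scan_eq]
  simp only [List.nil_append]
  rw [outer_catch k _ _ 0 (tRows_nodup grid _ _)]
  simp only [zero_add]
  rw [List.filter_flatMap]
  have hlen :
      ((List.range grid.length).flatMap
          (fun i => (pvTRow grid (grid.headD []).length i).filter
            (pvCaughtBy k ((List.range grid.length).flatMap
              (fun i => (List.range (grid.headD []).length).filterMap (pvPOf grid i)))))).length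
        = ((List.range grid.length).flatMap
            (fun i => (List.range (grid.headD []).length).filter (fun j =>
              decide (pvCell grid i j = "T") &&
              ((List.range grid.length).flatMap
                (fun i => (List.range (grid.headD []).length).filterMap (pvPOf grid i))).any
                (fun p => decide (|(i : Int) - p.1| + |(j : Int) - p.2| ≤ k))))).length := by
    rw [List.length_flatMap, List.length_flatMap]
    congr 1
    apply List.map_congr_left
    intro i _
    exact row_len grid k (grid.headD []).length _ i
  exact_mod_cast hlen
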